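-- pv_equiv track=rewrite | github.com/KGuzikowski/other-Uwr-stuff | NLP/L2/zad1.py | make_bigrams
-- ===== SOURCE A (Python) =====
-- def make_bigrams(corpuses):
--     bigrams = {}
--
--     for c, corpus in corpuses.items():
--         for i in range(len(corpus)):
--             if i + 1 < len(corpus):
--                 if (corpus[i], corpus[i+1]) in bigrams:
--                     if c in bigrams[(corpus[i], corpus[i+1])]:
--                         bigrams[(corpus[i], corpus[i+1])][c] += 1
--                     else:
--                         bigrams[(corpus[i], corpus[i+1])][c] = 1
--                 else:
--                     bigrams[(corpus[i], corpus[i+1])] = {c: 1}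
--
--     return bigrams
-- ===== SOURCE B (Python) =====
-- def make_bigrams(corpuses):
--     bigrams = {}
--     for c, corpus in corpuses.items():
--         local = {}
--         for bg in zip(corpus, corpus[1:]):
--             local[bg] = local.get(bg, 0) + 1
--         for bg, cnt in local.items():
--             d = bigrams.setdefault(bg, {})
--             d[c] = d.get(c, 0) + cnt
--     return bigrams
-- ===== Notes on version B (the rewrite author's own statement) =====
-- stated objective: alternative
-- what changed: Replaces A's interleaved per-element increment-or-initialise ladder on the nested dict with a two-phase structure: build a local per-corpus bigram counter in one pass, then merge those aggregated counts into the global dict in a second pass.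
import Mathlib
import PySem

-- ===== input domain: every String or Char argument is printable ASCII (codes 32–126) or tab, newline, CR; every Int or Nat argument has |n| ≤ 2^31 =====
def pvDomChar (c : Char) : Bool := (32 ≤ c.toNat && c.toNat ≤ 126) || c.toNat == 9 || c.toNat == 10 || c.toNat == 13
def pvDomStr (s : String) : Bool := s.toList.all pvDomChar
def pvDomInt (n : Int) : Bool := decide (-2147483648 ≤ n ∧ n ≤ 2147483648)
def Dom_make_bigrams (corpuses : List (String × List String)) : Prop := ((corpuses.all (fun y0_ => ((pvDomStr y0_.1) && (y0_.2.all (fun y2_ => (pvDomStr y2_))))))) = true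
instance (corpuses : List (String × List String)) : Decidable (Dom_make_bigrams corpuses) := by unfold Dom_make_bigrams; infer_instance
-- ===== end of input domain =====

-- B replaces A's interleaved per-element increment ladder by a per-corpus local bigram
-- counter that is then merged into the global nested dict; same cost, different decomposition.


-- ===== PORT A =====
-- one corpus: for i in range(len(corpus)): if i+1 < len(corpus): increment-or-initialise
def aInner (c : String) (corpus : List String)
    (bigrams : PySem.Dict (String × String) (PySem.Dict String Int)) :
    PySem.Dict (String × String) (PySem.Dict String Int) :=
  (PySem.List.pyRange 0 (corpus.length : Int) 1).foldl (fun bigrams i =>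
    if i + 1 < (corpus.length : Int) then
      -- corpus[i], corpus[i+1]: in range here, so pyGetD is exact
      let key := (PySem.List.pyGetD corpus i "", PySem.List.pyGetD corpus (i + 1) "")
      match bigrams.get? key with
      | some d =>
        match d.get? c with
        | some v => bigrams.insert key (d.insert c (v + 1))
        | none   => bigrams.insert key (d.insert c 1)
      | none => bigrams.insert key (PySem.Dict.ofList [(c, 1)])
    else bigrams) bigrams

def make_bigrams (corpuses : List (String × List String)) :
    List (String × String × List (String × Int)) :=
  ((corpuses.foldl (fun bigrams p => aInner p.1 p.2 bigrams) PySem.Dict.empty).items.map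
    (fun q => (q.1.1, q.1.2, q.2.items)))

-- ===== PORT B =====
-- phase 1: local[bg] = local.get(bg, 0) + 1 over zip(corpus, corpus[1:])
def bLocal (corpus : List String) : PySem.Dict (String × String) Int :=
  (corpus.zip (corpus.drop 1)).foldl (fun d bg => d.insert bg (d.getD bg 0 + 1))
    PySem.Dict.empty

-- phase 2: d = bigrams.setdefault(bg, {}); d[c] = d.get(c, 0) + cnt
def bMerge (c : String) (bigrams : PySem.Dict (String × String) (PySem.Dict String Int))
    (items : List ((String × String) × Int)) :
    PySem.Dict (String × String) (PySem.Dict String Int) :=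
  items.foldl (fun bigrams q =>
    let d := (bigrams.get? q.1).getD PySem.Dict.empty
    bigrams.insert q.1 (d.insert c (d.getD c 0 + q.2))) bigrams

def make_bigrams_alt (corpuses : List (String × List String)) :
    List (String × String × List (String × Int)) :=
  ((corpuses.foldl (fun bigrams p => bMerge p.1 bigrams (bLocal p.2).items)
      PySem.Dict.empty).items.map (fun q => (q.1.1, q.1.2, q.2.items)))

-- ===== PRECONDITION & SPEC =====
def Spec_make_bigrams (corpuses : List (String × List String)) (out : List (String × String × List (String × Int))) : Prop := out = make_bigrams_alt corpuses
instance (corpuses : List (String × List String)) (out : List (String × String × List (String × Int))) : Decidable (Spec_make_bigrams corpuses out) := by unfold Spec_make_bigrams; infer_instance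

-- ===== CLAIM (what is proved, stated in full; the proofs are below) =====
def Claim_equal_make_bigrams : Prop := ∀ (corpuses : List (String × List String)), Dom_make_bigrams corpuses → Spec_make_bigrams corpuses (make_bigrams corpuses)

-- ===== LEMMAS AND PROOFS =====

-- A's single increment-or-initialise step, as a function of the bigram key
def incStep (c : String) (bigrams : PySem.Dict (String × String) (PySem.Dict String Int))
    (key : String × String) : PySem.Dict (String × String) (PySem.Dict String Int) :=
  match bigrams.get? key with
  | some d =>
    match d.get? c with
    | some v => bigrams.insert key (d.insert c (v + 1))
    | none   => bigrams.insert key (d.insert c 1)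
  | none => bigrams.insert key (PySem.Dict.ofList [(c, 1)])

-- B's merge step at count n
def mStep (c : String) (bigrams : PySem.Dict (String × String) (PySem.Dict String Int))
    (q : (String × String) × Int) : PySem.Dict (String × String) (PySem.Dict String Int) :=
  let d := (bigrams.get? q.1).getD PySem.Dict.empty
  bigrams.insert q.1 (d.insert c (d.getD c 0 + q.2))

theorem range_zip {σ α : Type} (g : σ → α × α → σ) (dflt : α) :
    ∀ (xs : List α) (s : σ),
      (PySem.List.pyRange 0 (xs.length : Int) 1).foldl
        (fun s i => if i + 1 < (xs.length : Int) then
            g s (PySem.List.pyGetD xs i dflt, PySem.List.pyGetD xs (i + 1) dflt)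
          else s) s
      = (xs.zip (xs.drop 1)).foldl g s := by
  intro xs
  induction xs with
  | nil =>
    intro s
    simp [PySem.List.pyRange_one_eq_nil]
  | cons a xs ih =>
    intro s
    have hlen : (((a :: xs).length : Int)) = (xs.length : Int) + 1 := by
      simp [List.length_cons]
    rw [hlen, PySem.List.pyRange_one_cons (by positivity), List.foldl_cons]
    have hshift :
        ∀ t : σ, (PySem.List.pyRange 1 ((xs.length : Int) + 1)).foldl
            (fun s i => if i + 1 < (xs.length : Int) + 1 then
                g s (PySem.List.pyGetD (a :: xs) i dflt, PySem.List.pyGetD (a :: xs) (i + 1) dflt)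
              else s) t
          = (PySem.List.pyRange 0 (xs.length : Int)).foldl
            (fun s i => if i + 1 < (xs.length : Int) then
                g s (PySem.List.pyGetD xs i dflt, PySem.List.pyGetD xs (i + 1) dflt)
              else s) t := by
      intro t
      rw [PySem.List.pyRange_one 1, PySem.List.pyRange_one 0, List.foldl_map, List.foldl_map]
      have harg : ((xs.length : Int) + 1 - 1).toNat = ((xs.length : Int) - 0).toNat := by omega
      rw [harg]
      refine PySem.List.foldl_congr_mem _ _ _ _ (fun acc k _ => ?_)
      have g1 : PySem.List.pyGetD (a :: xs) (1 + (k : Int)) dflt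
          = PySem.List.pyGetD xs ((0 : Int) + (k : Int)) dflt := by
        have e1 : (1 : Int) + (k : Int) = ((k + 1 : Nat) : Int) := by push_cast; ring
        have e2 : (0 : Int) + (k : Int) = ((k : Nat) : Int) := by ring
        rw [e1, e2, PySem.List.pyGetD_natCast, PySem.List.pyGetD_natCast]
        simp [List.getD]
      have g2 : PySem.List.pyGetD (a :: xs) (1 + (k : Int) + 1) dflt
          = PySem.List.pyGetD xs ((0 : Int) + (k : Int) + 1) dflt := by
        have e1 : (1 : Int) + (k : Int) + 1 = ((k + 2 : Nat) : Int) := by push_cast; ring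
        have e2 : (0 : Int) + (k : Int) + 1 = ((k + 1 : Nat) : Int) := by push_cast; ring
        rw [e1, e2, PySem.List.pyGetD_natCast, PySem.List.pyGetD_natCast]
        simp [List.getD]
      split_ifs with h1 h2
      · rw [g1, g2]
      · exfalso; omega
      · exfalso; omega
      · rfl
    cases xs with
    | nil =>
      have hfalse : ¬ ((0 : Int) + 1 < (([] : List α).length : Int) + 1) := by
        simp
      have h01 : (0 : Int) + 1 = 1 := by norm_num
      rw [if_neg hfalse, h01, hshift]
      simp [PySem.List.pyRange_one_eq_nil]
    | cons b xs' =>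
      have htrue : ((0 : Int) + 1 < (((b :: xs').length : Int)) + 1) := by
        simp
      rw [if_pos htrue]
      have hg0 : PySem.List.pyGetD (a :: b :: xs') 0 dflt = a := by
        simp [PySem.List.pyGetD_zero_cons]
      have hg1 : PySem.List.pyGetD (a :: b :: xs') (0 + 1) dflt = b := by
        have h01 : (0 : Int) + 1 = ((1 : Nat) : Int) := by norm_num
        rw [h01, PySem.List.pyGetD_natCast]
        simp [List.getD]
      have h01 : (0 : Int) + 1 = 1 := by norm_num
      rw [hg0, hg1, h01, hshift]
      have hzip : (a :: b :: xs').zip ((a :: b :: xs').drop 1)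
          = (a, b) :: (b :: xs').zip ((b :: xs').drop 1) := by
        simp [List.zip_cons_cons]
      rw [hzip, List.foldl_cons]
      exact ih (g s (a, b))

theorem incStep_eq_mStep_one (c : String) (B : PySem.Dict (String × String) (PySem.Dict String Int)) (x : String × String) :
    incStep c B x = mStep c B (x, 1) := by
  unfold incStep mStep
  cases hB : B.get? x with
  | none =>
    have : PySem.Dict.ofList [(c, (1 : Int))]
        = (PySem.Dict.empty : PySem.Dict String Int).insert c
            (PySem.Dict.getD PySem.Dict.empty c 0 + 1) := by
      simp [PySem.Dict.getD_empty]; rfl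
    simp only [Option.getD_none]
    rw [this]
  | some d =>
    cases hc : d.get? c with
    | none =>
      simp only [Option.getD_some]
      rw [PySem.Dict.getD_of_get?_eq_none d 0 hc, hc]
      norm_num
    | some v =>
      simp only [Option.getD_some]
      rw [PySem.Dict.getD_of_get?_eq_some d 0 hc, hc]

theorem incStep_of_contains (c : String) (B : PySem.Dict (String × String) (PySem.Dict String Int)) (x : String × String)
    (h : B.contains x = true) :
    incStep c B x = B.insert x (((B.get? x).getD PySem.Dict.empty).insert c
      (((B.get? x).getD PySem.Dict.empty).getD c 0 + 1)) := by
  unfold incStep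
  rw [PySem.Dict.contains_eq_isSome_get?] at h
  cases hB : B.get? x with
  | none => rw [hB] at h; simp at h
  | some d =>
    cases hc : d.get? c with
    | none =>
      simp only [Option.getD_some]
      rw [PySem.Dict.getD_of_get?_eq_none d 0 hc, hc]
      norm_num
    | some v =>
      simp only [Option.getD_some]
      rw [PySem.Dict.getD_of_get?_eq_some d 0 hc, hc]

-- inserting at a key already present commutes (as a Dict, items order included) with
-- inserting at any other key
theorem insert_comm_of_contains {ν : Type} (B : PySem.Dict (String × String) ν)
    (x k : String × String) (u w : ν) (hx : B.contains x = true) (hk : k ≠ x) :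
    (B.insert x u).insert k w = (B.insert k w).insert x u := by
  have hkx : (k == x) = false := by simpa using hk
  have hxk : (x == k) = false := by simpa using (Ne.symm hk)
  apply PySem.Dict.ext
  by_cases hkB : B.contains k = true
  · have h1 : (B.insert x u).contains k = true := by
      rw [PySem.Dict.contains_insert]; simp [hkB]
    have h2 : (B.insert k w).contains x = true := by
      rw [PySem.Dict.contains_insert]; simp [hx]
    rw [PySem.Dict.items_insert_of_contains _ w h1,
        PySem.Dict.items_insert_of_contains _ u hx,
        PySem.Dict.items_insert_of_contains _ u h2,
        PySem.Dict.items_insert_of_contains _ w hkB,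
        List.map_map, List.map_map]
    refine List.map_congr_left (fun p _ => ?_)
    by_cases hp1 : p.1 = x
    · simp [hp1, Ne.symm hk]
    · by_cases hp2 : p.1 = k
      · simp [hp2, hk]
      · simp [hp1, hp2]
  · have hkB' : B.contains k = false := by simpa using hkB
    have h1 : (B.insert x u).contains k = false := by
      rw [PySem.Dict.contains_insert]; simp [hkB', hkx]
    have h2 : (B.insert k w).contains x = true := by
      rw [PySem.Dict.contains_insert]; simp [hx]
    rw [PySem.Dict.items_insert_of_not_contains _ w h1,
        PySem.Dict.items_insert_of_contains _ u hx,
        PySem.Dict.items_insert_of_contains _ u h2,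
        PySem.Dict.items_insert_of_not_contains _ w hkB',
        List.map_append]
    simp
    exact fun h => absurd h hk

theorem mStep_incStep_comm (c : String) (B : PySem.Dict (String × String) (PySem.Dict String Int))
    (x : String × String) (hx : B.contains x = true) :
    ∀ (rest : List ((String × String) × Int)), x ∉ rest.map (·.1) →
      rest.foldl (mStep c) (incStep c B x) = incStep c (rest.foldl (mStep c) B) x := by
  intro rest
  induction rest generalizing B with
  | nil => intro _; rfl
  | cons q rest ih =>
    intro hmem
    have hqx : q.1 ≠ x := by
      intro h; exact hmem (by simp [h])
    have hmem' : x ∉ rest.map (·.1) := fun h => hmem (List.mem_cons_of_mem _ h)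
    have hcont' : (mStep c B q).contains x = true := by
      unfold mStep; rw [PySem.Dict.contains_insert]; simp [hx]
    have key : mStep c (incStep c B x) q = incStep c (mStep c B q) x := by
      rw [incStep_of_contains c B x hx]
      rw [incStep_of_contains c (mStep c B q) x hcont']
      unfold mStep
      rw [PySem.Dict.get?_insert_of_ne B _ hqx,
          PySem.Dict.get?_insert_of_ne B _ (Ne.symm hqx)]
      exact insert_comm_of_contains B x q.1 _ _ hx hqx
    rw [List.foldl_cons, List.foldl_cons, key]
    exact ih (mStep c B q) hcont' hmem'

theorem mStep_succ (c : String) (B : PySem.Dict (String × String) (PySem.Dict String Int))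
    (x : String × String) (v : Int) :
    mStep c B (x, v + 1) = incStep c (mStep c B (x, v)) x := by
  have hcont : (mStep c B (x, v)).contains x = true := by
    unfold mStep; rw [PySem.Dict.contains_insert]; simp
  rw [incStep_of_contains c _ x hcont]
  unfold mStep
  simp only [PySem.Dict.get?_insert_self, Option.getD_some]
  rw [PySem.Dict.insert_insert_self, PySem.Dict.insert_insert_self]
  have : ∀ (d0 : PySem.Dict String Int),
      (d0.insert c (d0.getD c 0 + v)).getD c 0 = d0.getD c 0 + v := by
    intro d0
    rw [PySem.Dict.getD_of_get?_eq_some _ 0 (PySem.Dict.get?_insert_self d0 c _)]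
  rw [this]
  ring_nf

theorem bMerge_rep (c : String) (x : String × String) (v : Int) :
    ∀ (items : List ((String × String) × Int)) (B : PySem.Dict (String × String) (PySem.Dict String Int)),
      (items.map (·.1)).Nodup → (x, v) ∈ items →
      bMerge c B (items.map (fun p => if p.1 == x then (x, v + 1) else p))
        = incStep c (bMerge c B items) x := by
  intro items
  induction items with
  | nil => intro B _ hm; simp at hm
  | cons p rest ih =>
    intro B hnd hm
    have hnd' : (rest.map (·.1)).Nodup := by
      simpa using hnd.sublist (by simp [List.map_cons])
    by_cases hpx : p.1 = x
    · have hxrest : x ∉ rest.map (·.1) := by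
        have h0 := hnd
        rw [List.map_cons, List.nodup_cons, hpx] at h0
        exact h0.1
      have hpv : p = (x, v) := by
        rcases List.mem_cons.mp hm with h | h
        · exact h.symm
        · exact absurd (List.mem_map_of_mem (f := (·.1)) h) hxrest
      subst hpv
      have hrest_id : rest.map (fun p => if (p.1 == x) = true then (x, v + 1) else p)
          = rest := by
        refine List.map_congr_left (fun q hq => ?_) |>.trans (List.map_id rest)
        have : q.1 ≠ x := by
          intro h
          exact hxrest (h ▸ List.mem_map_of_mem (f := (·.1)) hq)
        simp [this]
      simp only [List.map_cons, beq_self_eq_true, if_true]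
      unfold bMerge
      rw [List.foldl_cons, List.foldl_cons, hrest_id]
      show rest.foldl (mStep c) (mStep c B (x, v + 1))
          = incStep c (rest.foldl (mStep c) (mStep c B (x, v))) x
      rw [mStep_succ]
      have hcont : (mStep c B (x, v)).contains x = true := by
        unfold mStep; rw [PySem.Dict.contains_insert]; simp
      exact mStep_incStep_comm c _ x hcont rest hxrest
    · have hm' : (x, v) ∈ rest := by
        rcases List.mem_cons.mp hm with h | h
        · exact absurd (congrArg Prod.fst h).symm hpx
        · exact h
      have hbeq : (p.1 == x) = false := by simpa using hpx
      simp only [List.map_cons, hbeq, if_false, Bool.false_eq_true]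
      unfold bMerge
      rw [List.foldl_cons, List.foldl_cons]
      exact ih _ hnd' hm'

theorem bMerge_insert (c : String) (x : String × String)
    (local_ : PySem.Dict (String × String) Int)
    (B : PySem.Dict (String × String) (PySem.Dict String Int))
    (hnd : local_.keys.Nodup) :
    bMerge c B (local_.insert x (local_.getD x 0 + 1)).items
      = incStep c (bMerge c B local_.items) x := by
  by_cases hx : local_.contains x = true
  · rw [PySem.Dict.contains_eq_isSome_get?] at hx
    cases hg : local_.get? x with
    | none => rw [hg] at hx; simp at hx
    | some v =>
      rw [PySem.Dict.getD_of_get?_eq_some _ 0 hg]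
      rw [PySem.Dict.items_insert_of_contains _ _ (by
        rw [PySem.Dict.contains_eq_isSome_get?, hg]; rfl)]
      exact bMerge_rep c x v local_.items B hnd
        (PySem.Dict.mem_items_of_get?_eq_some _ hg)
  · have hx' : local_.contains x = false := by simpa using hx
    rw [PySem.Dict.getD_of_not_contains _ 0 hx',
        PySem.Dict.items_insert_of_not_contains _ _ hx']
    unfold bMerge
    rw [List.foldl_append, List.foldl_cons, List.foldl_nil]
    show mStep c (local_.items.foldl (mStep c) B) (x, 0 + 1) = _
    rw [incStep_eq_mStep_one]
    norm_num
    rfl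

theorem merge_counter (c : String) :
    ∀ (L : List (String × String)) (local_ : PySem.Dict (String × String) Int)
      (B : PySem.Dict (String × String) (PySem.Dict String Int)),
      local_.keys.Nodup →
      bMerge c B (L.foldl (fun d bg => d.insert bg (d.getD bg 0 + 1)) local_).items
        = L.foldl (incStep c) (bMerge c B local_.items) := by
  intro L
  induction L with
  | nil => intro local_ B _; rfl
  | cons bg L ih =>
    intro local_ B hnd
    rw [List.foldl_cons, List.foldl_cons,
        ih (local_.insert bg (local_.getD bg 0 + 1)) B
          (PySem.Dict.nodup_keys_insert local_ bg _ hnd),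
        bMerge_insert c bg local_ B hnd]

theorem aInner_eq (c : String) (xs : List String)
    (B : PySem.Dict (String × String) (PySem.Dict String Int)) :
    aInner c xs B = bMerge c B (bLocal xs).items := by
  have h1 : aInner c xs B
      = (PySem.List.pyRange 0 (xs.length : Int) 1).foldl
          (fun s i => if i + 1 < (xs.length : Int) then
              incStep c s (PySem.List.pyGetD xs i "", PySem.List.pyGetD xs (i + 1) "")
            else s) B := rfl
  rw [h1, range_zip (incStep c) "" xs B]
  have h2 : bMerge c B (bLocal xs).items
      = (xs.zip (xs.drop 1)).foldl (incStep c) (bMerge c B (PySem.Dict.empty).items) := by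
    exact merge_counter c (xs.zip (xs.drop 1)) PySem.Dict.empty B PySem.Dict.nodup_keys_empty
  rw [h2]
  rfl

-- ===== VERDICT (by name: the statement is the Claim_ definition above) =====
theorem make_bigrams_spec : Claim_equal_make_bigrams := by
  intro corpuses _
  unfold Spec_make_bigrams make_bigrams make_bigrams_alt
  have : (fun (bigrams : PySem.Dict (String × String) (PySem.Dict String Int)) (p : String × List String) =>
      aInner p.1 p.2 bigrams) = fun bigrams p => bMerge p.1 bigrams (bLocal p.2).items := by
    funext bigrams p; exact aInner_eq p.1 p.2 bigrams
  rw [this]
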